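-- pv_equiv track=rewrite | github.com/DongilMin/Programmers | 프로그래머스/2/42626. 더 맵게/더 맵게.py | solution
-- ===== SOURCE A (Python) =====
-- import heapq
--
-- def solution(scoville, K):
--     heapq.heapify(scoville)
--
--     cnt = 0
--     while scoville[0] < K:
--
--         if len(scoville) < 2:
--             return -1
--
--         first_min = heapq.heappop(scoville)
--         second_min = heapq.heappop(scoville)
--
--         new_scoville = first_min + (second_min * 2)
--         heapq.heappush(scoville, new_scoville)
--         cnt += 1
--     return cnt
-- ===== SOURCE B (Python) =====
-- def solution(scoville, K):
--     # keep an UNORDERED pool; find the two smallest each round by plain min() scans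
--     pool = list(scoville)
--     cnt = 0
--     while min(pool) < K:
--         if len(pool) < 2:
--             return -1
--         a = min(pool)
--         pool.remove(a)
--         b = min(pool)
--         pool.remove(b)
--         pool.append(a + 2 * b)
--         cnt += 1
--     return cnt
-- ===== Notes on version B (the rewrite author's own statement) =====
-- stated objective: alternative
-- what changed: Drops the binary heap entirely: B keeps an unordered pool and each round finds the two smallest by fresh linear min() scans, removes them and appends the mixed value; no ordering invariant (heap or sorted) is ever maintained, trading A's O(n log n) for selection-by-scan O(n^2).
import Mathlib
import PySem

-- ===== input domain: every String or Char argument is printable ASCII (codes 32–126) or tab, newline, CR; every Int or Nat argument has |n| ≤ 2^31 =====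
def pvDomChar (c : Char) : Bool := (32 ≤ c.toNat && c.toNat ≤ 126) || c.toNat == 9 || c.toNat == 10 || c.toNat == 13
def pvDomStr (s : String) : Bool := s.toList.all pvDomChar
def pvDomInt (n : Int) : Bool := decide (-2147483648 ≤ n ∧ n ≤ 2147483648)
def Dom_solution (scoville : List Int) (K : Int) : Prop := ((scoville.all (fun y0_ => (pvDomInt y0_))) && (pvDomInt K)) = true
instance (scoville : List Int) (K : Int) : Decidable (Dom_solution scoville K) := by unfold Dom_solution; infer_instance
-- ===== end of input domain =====

-- B drops the heap entirely: an unordered pool, the two smallest found each round by fresh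
-- linear min() scans (alternative algorithm, not faster). A mutates `scoville` in place
-- (heapify) while B works on a copy; the equivalence proved here is about the RETURN value only.

-- ===== PORT A =====
-- A calls the heapq library; it is ported here as an explicit binary min-heap on a list
-- (heapify = bottom-up sift-down, heappop = move last to root and sift down, heappush =
-- append and sift up), exact for the RETURNED values of heapify/heappop/heappush.

/-- `l[i]` for an index known to be in range (default 0 never observed in proofs). -/
def hGet (l : List Int) (i : Nat) : Int := l.getD i 0

/-- swap the entries at positions `i` and `j` -/
def hSwap (l : List Int) (i j : Nat) : List Int := (l.set i (hGet l j)).set j (hGet l i)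

/-- index of the smaller of node `i` and its left child (if present) -/
def siftStep1 (l : List Int) (i : Nat) : Nat :=
  if 2*i+1 < l.length ∧ hGet l (2*i+1) < hGet l i then 2*i+1 else i

/-- index of the smallest among node `i` and its (existing) children -/
def siftStep (l : List Int) (i : Nat) : Nat :=
  if 2*i+2 < l.length ∧ hGet l (2*i+2) < hGet l (siftStep1 l i) then 2*i+2 else siftStep1 l i

/-- push the entry at `i` down until the min-heap property holds below it
(`fuel` only makes the recursion structural; `l.length` steps always suffice) -/
def siftDownAux : Nat → List Int → Nat → List Int
  | 0, l, _ => l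
  | fuel+1, l, i =>
    if siftStep l i = i then l
    else siftDownAux fuel (hSwap l i (siftStep l i)) (siftStep l i)

def siftDown (l : List Int) (i : Nat) : List Int := siftDownAux l.length l i

/-- heapq.heapify: sift down the internal nodes, bottom-up -/
def heapify (l : List Int) : List Int := (List.range (l.length / 2)).reverse.foldl siftDown l

/-- push the entry at `i` up towards the root while smaller than its parent
(`fuel` only makes the recursion structural; `i` steps always suffice) -/
def siftUpAux : Nat → List Int → Nat → List Int
  | 0, l, _ => l
  | fuel+1, l, i =>
    match i with
    | 0 => l
    | i' + 1 =>
      if hGet l (i'+1) < hGet l (i'/2) then siftUpAux fuel (hSwap l (i'+1) (i'/2)) (i'/2) else l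

def siftUp (l : List Int) (i : Nat) : List Int := siftUpAux i l i

/-- heapq.heappush -/
def heappush (l : List Int) (x : Int) : List Int := siftUp (l ++ [x]) l.length

/-- heapq.heappop: returns (popped min, remaining heap); exact for nonempty input -/
def heappop (l : List Int) : Int × List Int :=
  if l.length ≤ 1 then (hGet l 0, l.dropLast)
  else (hGet l 0, siftDown ((l.dropLast).set 0 (hGet l (l.length - 1))) 0)

/-- the while-loop of A (`fuel` only makes the recursion structural; the list shrinks by
one element per iteration, so `l.length` steps always suffice) -/
def solLoopAux : Nat → List Int → Int → Int → Int
  | 0, _, _, cnt => cnt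
  | fuel+1, l, K, cnt =>
    if hGet l 0 < K then
      if l.length < 2 then -1
      else
        solLoopAux fuel (heappush (heappop (heappop l).2).2
          ((heappop l).1 + (heappop (heappop l).2).1 * 2)) K (cnt + 1)
    else cnt

def solution (scoville : List Int) (K : Int) : Int :=
  solLoopAux (heapify scoville).length (heapify scoville) K 0

-- ===== PORT B =====
-- B keeps the pool unordered: each round `min(pool)` (a linear scan), `pool.remove`
-- (delete the first occurrence), again for the second smallest, then append the mix.
-- `min([])` raises ValueError and is unreachable under Pre_; `remove` never fails
-- because its argument is `min(pool)`, a member — the `.getD`/`cnt` fallbacks below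
-- are dead branches making the recursion total.

/-- the while-loop of B (`fuel` only makes the recursion structural; the pool shrinks by
one element per iteration, so its length always suffices) -/
def altLoopAux : Nat → List Int → Int → Int → Int
  | 0, _, _, cnt => cnt
  | fuel+1, pool, K, cnt =>
    match PySem.List.min? pool (fun x => x) with
    | none => cnt           -- min([]) raises ValueError; unreachable under Pre_
    | some a =>
      if a < K then
        if pool.length < 2 then -1
        else
          let p1 := (PySem.List.remove? pool a).getD pool
          match PySem.List.min? p1 (fun x => x) with
          | none => cnt     -- unreachable: p1 is nonempty
          | some b =>
            altLoopAux fuel (((PySem.List.remove? p1 b).getD p1) ++ [a + 2 * b]) K (cnt + 1)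
      else cnt

def solution_alt (scoville : List Int) (K : Int) : Int :=
  altLoopAux scoville.length scoville K 0

-- ===== PRECONDITION & SPEC =====
-- Pre_ excludes exactly the empty list, on which both Pythons raise (A IndexError, B ValueError).
def Pre_solution (scoville : List Int) (K : Int) : Prop := scoville ≠ []
instance (scoville : List Int) (K : Int) : Decidable (Pre_solution scoville K) := by
  unfold Pre_solution; infer_instance

def pvWitness_solution : List Int × Int := ([1, 2, 3, 9, 10, 12], 7)

def Spec_solution (scoville : List Int) (K : Int) (out : Int) : Prop := out = solution_alt scoville K
instance (scoville : List Int) (K : Int) (out : Int) : Decidable (Spec_solution scoville K out) := by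
  unfold Spec_solution; infer_instance

-- ===== CLAIM (what is proved, stated in full; the proofs are below) =====
def Claim_equal_solution : Prop := ∀ (scoville : List Int) (K : Int), Dom_solution scoville K → Pre_solution scoville K → Spec_solution scoville K (solution scoville K)

-- ===== LEMMAS AND PROOFS =====

theorem hSwap_length (l : List Int) (i j : Nat) : (hSwap l i j).length = l.length := by
  simp [hSwap]

theorem siftStep_lt (l : List Int) (i : Nat) :
    siftStep l i = i ∨ (i < siftStep l i ∧ siftStep l i < l.length) := by
  unfold siftStep siftStep1
  split_ifs <;> omega

theorem siftDownAux_length (fuel : Nat) (l : List Int) (i : Nat) :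
    (siftDownAux fuel l i).length = l.length := by
  fun_induction siftDownAux with
  | case1 => rfl
  | case2 => rfl
  | case3 fuel l i h ih => rw [ih, hSwap_length]

theorem siftDown_length (l : List Int) (i : Nat) : (siftDown l i).length = l.length :=
  siftDownAux_length l.length l i

theorem siftUpAux_length (fuel : Nat) (l : List Int) (i : Nat) :
    (siftUpAux fuel l i).length = l.length := by
  fun_induction siftUpAux with
  | case1 => rfl
  | case2 => rfl
  | case3 fuel l i' h ih => rw [ih, hSwap_length]
  | case4 => rfl

theorem siftUp_length (l : List Int) (i : Nat) : (siftUp l i).length = l.length :=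
  siftUpAux_length i l i

theorem heappush_length (l : List Int) (x : Int) :
    (heappush l x).length = l.length + 1 := by
  simp [heappush, siftUp_length]

theorem heappop_length (l : List Int) : (heappop l).2.length = l.length - 1 := by
  unfold heappop
  split <;> simp [siftDown_length]

-- basic index/set/swap facts -------------------------------------------------

theorem hGet_eq_getElem (l : List Int) (i : Nat) (h : i < l.length) : hGet l i = l[i] :=
  List.getD_eq_getElem l 0 h

theorem hGet_set_self (l : List Int) (i : Nat) (v : Int) (h : i < l.length) :
    hGet (l.set i v) i = v := by
  simp [hGet, List.getD, List.getElem?_set_self h]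

theorem hGet_set_ne (l : List Int) (i k : Nat) (v : Int) (h : i ≠ k) :
    hGet (l.set i v) k = hGet l k := by
  simp [hGet, List.getD, List.getElem?_set_ne h]

theorem hGet_swap_fst (l : List Int) (i j : Nat) (hi : i < l.length) (hij : i ≠ j) :
    hGet (hSwap l i j) i = hGet l j := by
  rw [hSwap, hGet_set_ne _ _ _ _ (Ne.symm hij), hGet_set_self _ _ _ hi]

theorem hGet_swap_snd (l : List Int) (i j : Nat) (hj : j < l.length) :
    hGet (hSwap l i j) j = hGet l i := by
  rw [hSwap, hGet_set_self]
  simpa using hj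

theorem hGet_swap_other (l : List Int) (i j k : Nat) (h1 : k ≠ i) (h2 : k ≠ j) :
    hGet (hSwap l i j) k = hGet l k := by
  rw [hSwap, hGet_set_ne _ _ _ _ (Ne.symm h2), hGet_set_ne _ _ _ _ (Ne.symm h1)]

theorem cons_set_perm (t : List Int) (j : Nat) (x : Int) (hj : j < t.length) :
    (hGet t j :: t.set j x).Perm (x :: t) := by
  rw [hGet_eq_getElem t j hj]
  exact ((List.set_perm_cons_eraseIdx hj x).cons _).trans
    ((List.Perm.swap x t[j] _).trans ((List.getElem_cons_eraseIdx_perm hj).cons x))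

theorem swap_perm (l : List Int) (i j : Nat) (hi : i < l.length) (hj : j < l.length) :
    (hSwap l i j).Perm l := by
  induction l generalizing i j with
  | nil => simp at hi
  | cons x t ih =>
    match i, j with
    | 0, 0 => simp [hSwap, hGet]
    | 0, j+1 =>
      have hjt : j < t.length := by simpa using hj
      have h1 : hSwap (x :: t) 0 (j+1) = hGet t j :: t.set j x := by
        simp [hSwap, hGet]
      rw [h1]; exact cons_set_perm t j x hjt
    | i+1, 0 =>
      have hit : i < t.length := by simpa using hi
      have h1 : hSwap (x :: t) (i+1) 0 = hGet t i :: t.set i x := by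
        simp [hSwap, hGet]
      rw [h1]; exact cons_set_perm t i x hit
    | i+1, j+1 =>
      have h1 : hSwap (x :: t) (i+1) (j+1) = x :: hSwap t i j := by
        simp [hSwap, hGet]
      rw [h1]
      exact (ih i j (by simpa using hi) (by simpa using hj)).cons x

-- heap structure -------------------------------------------------------------

/-- min-heap property for every child whose parent index is `≥ m` -/
def HeapD (l : List Int) (m : Nat) : Prop :=
  ∀ k, 0 < k → k < l.length → m ≤ (k-1)/2 → hGet l ((k-1)/2) ≤ hGet l k

theorem siftStep_spec (l : List Int) (i : Nat) :
    i ≤ siftStep l i ∧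
    (siftStep l i = i ∨
      (siftStep l i < l.length ∧ (siftStep l i = 2*i+1 ∨ siftStep l i = 2*i+2) ∧
        hGet l (siftStep l i) < hGet l i)) ∧
    (∀ k, (k = 2*i+1 ∨ k = 2*i+2) → k < l.length → hGet l (siftStep l i) ≤ hGet l k) := by
  unfold siftStep siftStep1
  split_ifs <;>
    refine ⟨by omega, by omega, ?_⟩ <;> (intro k hk hkl; rcases hk with hk | hk <;> subst hk <;> omega)

theorem siftDownAux_perm (fuel : Nat) (l : List Int) (i : Nat) :
    (siftDownAux fuel l i).Perm l := by
  fun_induction siftDownAux with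
  | case1 => exact List.Perm.refl _
  | case2 => exact List.Perm.refl _
  | case3 fuel l i h ih =>
    rcases siftStep_lt l i with h' | h'
    · exact absurd h' h
    · exact ih.trans (swap_perm l i (siftStep l i) (by omega) h'.2)

theorem siftDown_perm (l : List Int) (i : Nat) : (siftDown l i).Perm l :=
  siftDownAux_perm l.length l i

theorem siftDownAux_heapD (fuel : Nat) (l : List Int) (i : Nat) : ∀ m, m ≤ i →
    l.length ≤ fuel + i →
    (∀ k, 0 < k → k < l.length → m ≤ (k-1)/2 → (k-1)/2 ≠ i →
      hGet l ((k-1)/2) ≤ hGet l k) →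
    (∀ k, 0 < k → k < l.length → (k-1)/2 = i → 0 < i → m ≤ (i-1)/2 →
      hGet l ((i-1)/2) ≤ hGet l k) →
    HeapD (siftDownAux fuel l i) m := by
  fun_induction siftDownAux with
  | case1 l i =>
    intro m hmi hfuel h1 h2 k hk0 hkl hkm
    by_cases hpar : (k-1)/2 = i
    · omega
    · exact h1 k hk0 hkl hkm hpar
  | case2 fuel l i hstep =>
    intro m hmi hfuel h1 h2 k hk0 hkl hkm
    by_cases hpar : (k-1)/2 = i
    · have hs := (siftStep_spec l i).2.2 k (by omega) hkl
      rw [hstep] at hs; rw [hpar]; exact hs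
    · exact h1 k hk0 hkl hkm hpar
  | case3 fuel l i hstep ih =>
    intro m hmi hfuel h1 h2
    obtain ⟨hle, hcase, hmin⟩ := siftStep_spec l i
    rcases hcase with he | ⟨hclen, hc12, hclt⟩
    · exact absurd he hstep
    set c := siftStep l i with hcdef
    have hic : i < c := by omega
    have hilen : i < l.length := by omega
    have hwlen : (hSwap l i c).length = l.length := hSwap_length l i c
    have wi : hGet (hSwap l i c) i = hGet l c := hGet_swap_fst l i c hilen (by omega)
    have wc : hGet (hSwap l i c) c = hGet l i := hGet_swap_snd l i c hclen
    have wo : ∀ k, k ≠ i → k ≠ c → hGet (hSwap l i c) k = hGet l k :=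
      fun k h1' h2' => hGet_swap_other l i c k h1' h2'
    have hparc : (c-1)/2 = i := by omega
    apply ih m (by omega) (by rw [hSwap_length]; omega)
    · -- h1'
      intro k hk0 hkl hkm hkpar
      rw [hwlen] at hkl
      by_cases hpi : (k-1)/2 = i
      · by_cases hkc : k = c
        · rw [hpi, wi, hkc, wc]; exact le_of_lt hclt
        · have hki : k ≠ i := by omega
          rw [hpi, wi, wo k hki hkc]
          exact hmin k (by omega) hkl
      · by_cases hki : k = i
        · subst hki
          have h0i : 0 < k := hk0
          rw [wo ((k-1)/2) hpi hkpar, wi]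
          exact h2 c (by omega) hclen hparc h0i (by omega)
        · by_cases hkc : k = c
          · exact absurd (hkc ▸ hparc) hpi
          · rw [wo ((k-1)/2) hpi hkpar, wo k hki hkc]
            exact h1 k hk0 hkl hkm hpi
    · -- h2'
      intro k hk0 hkl hpar hc0 hmc
      rw [hwlen] at hkl
      have hkc : k ≠ c := by omega
      have hki : k ≠ i := by omega
      rw [hparc, wi, wo k hki hkc, ← hpar]
      exact h1 k hk0 hkl (by omega) (by omega)

theorem siftDown_heapD (l : List Int) (i : Nat) : ∀ m, m ≤ i →
    (∀ k, 0 < k → k < l.length → m ≤ (k-1)/2 → (k-1)/2 ≠ i →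
      hGet l ((k-1)/2) ≤ hGet l k) →
    (∀ k, 0 < k → k < l.length → (k-1)/2 = i → 0 < i → m ≤ (i-1)/2 →
      hGet l ((i-1)/2) ≤ hGet l k) →
    HeapD (siftDown l i) m :=
  fun m hmi h1 h2 => siftDownAux_heapD l.length l i m hmi (by omega) h1 h2

theorem heap_min (l : List Int) (h : HeapD l 0) : ∀ k, k < l.length → hGet l 0 ≤ hGet l k := by
  intro k
  induction k using Nat.strong_induction_on with
  | _ k ih =>
    intro hk
    rcases Nat.eq_zero_or_pos k with h0 | h0
    · subst h0; exact le_refl _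
    · exact le_trans (ih ((k-1)/2) (by omega) (by omega)) (h k h0 hk (Nat.zero_le _))

-- heapify --------------------------------------------------------------------

theorem heapify_loop (m : Nat) : ∀ (l : List Int), HeapD l m →
    HeapD ((List.range m).reverse.foldl siftDown l) 0 ∧
      ((List.range m).reverse.foldl siftDown l).Perm l := by
  induction m with
  | zero =>
    intro l h
    simp only [List.range_zero, List.reverse_nil, List.foldl_nil]
    exact ⟨h, List.Perm.refl l⟩
  | succ m ih =>
    intro l h
    have hrev : (List.range (m+1)).reverse = m :: (List.range m).reverse := by
      rw [List.range_succ, List.reverse_append]; rfl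
    rw [hrev]
    simp only [List.foldl_cons]
    have hnext : HeapD (siftDown l m) m := by
      apply siftDown_heapD l m m (le_refl m)
      · intro k hk0 hkl hkm hne
        exact h k hk0 hkl (by omega)
      · intro k hk0 hkl hpar hm0 hmm
        omega
    obtain ⟨hh, hp⟩ := ih (siftDown l m) hnext
    exact ⟨hh, hp.trans (siftDown_perm l m)⟩

theorem heapD_init (l : List Int) : HeapD l (l.length / 2) := by
  intro k hk0 hkl hkm
  omega

theorem heapify_spec (l : List Int) : HeapD (heapify l) 0 ∧ (heapify l).Perm l :=
  heapify_loop (l.length / 2) l (heapD_init l)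

-- heappush -------------------------------------------------------------------

theorem siftUpAux_perm (fuel : Nat) (l : List Int) (i : Nat) :
    i < l.length → (siftUpAux fuel l i).Perm l := by
  fun_induction siftUpAux with
  | case1 l i => intro _; exact List.Perm.refl _
  | case2 fuel l => intro _; exact List.Perm.refl _
  | case3 fuel l i' hlt ih =>
    intro hi
    have hp : i'/2 < l.length := by omega
    exact (ih (by rw [hSwap_length]; omega)).trans (swap_perm l (i'+1) (i'/2) hi hp)
  | case4 fuel l i' hnlt => intro _; exact List.Perm.refl _

theorem siftUp_perm (l : List Int) (i : Nat) : i < l.length → (siftUp l i).Perm l :=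
  siftUpAux_perm i l i

theorem siftUpAux_heap (fuel : Nat) (l : List Int) (i : Nat) : i ≤ fuel → i < l.length →
    (∀ k, 0 < k → k < l.length → k ≠ i → hGet l ((k-1)/2) ≤ hGet l k) →
    (∀ k, 0 < k → k < l.length → (k-1)/2 = i → hGet l ((i-1)/2) ≤ hGet l k) →
    HeapD (siftUpAux fuel l i) 0 := by
  fun_induction siftUpAux with
  | case1 l i =>
    intro hf _ h1 h2 k hk0 hkl _
    have hi0 : i = 0 := by omega
    subst hi0
    exact h1 k hk0 hkl (by omega)
  | case2 fuel l =>
    intro _ _ h1 h2 k hk0 hkl _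
    exact h1 k hk0 hkl (by omega)
  | case4 fuel l i' hnlt =>
    intro hf hi h1 h2 k hk0 hkl _
    by_cases hki : k = i'+1
    · subst hki
      have he : (i'+1-1)/2 = i'/2 := by omega
      rw [he]; omega
    · exact h1 k hk0 hkl hki
  | case3 fuel l i' hlt ih =>
    intro hf hi h1 h2
    have hplen : i'/2 < l.length := by omega
    have hpii : i'/2 ≠ i'+1 := by omega
    have wlen : (hSwap l (i'+1) (i'/2)).length = l.length := hSwap_length _ _ _
    have wfst : hGet (hSwap l (i'+1) (i'/2)) (i'+1) = hGet l (i'/2) :=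
      hGet_swap_fst l (i'+1) (i'/2) hi (by omega)
    have wsnd : hGet (hSwap l (i'+1) (i'/2)) (i'/2) = hGet l (i'+1) :=
      hGet_swap_snd l (i'+1) (i'/2) hplen
    have wo : ∀ k, k ≠ i'+1 → k ≠ i'/2 → hGet (hSwap l (i'+1) (i'/2)) k = hGet l k :=
      fun k ha hb => hGet_swap_other l (i'+1) (i'/2) k ha hb
    apply ih (by omega) (by omega)
    · -- h1'
      intro k hk0 hkl hkp
      rw [wlen] at hkl
      by_cases hki : k = i'+1
      · subst hki
        have he : (i'+1-1)/2 = i'/2 := by omega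
        rw [he, wsnd, wfst]
        exact le_of_lt hlt
      · by_cases hpar1 : (k-1)/2 = i'/2
        · rw [hpar1, wsnd, wo k hki (by omega)]
          have := h1 k hk0 hkl hki
          rw [hpar1] at this
          omega
        · by_cases hpar2 : (k-1)/2 = i'+1
          · rw [hpar2, wfst, wo k hki (by omega)]
            have := h2 k hk0 hkl hpar2
            have he : (i'+1-1)/2 = i'/2 := by omega
            rw [he] at this
            exact this
          · rw [wo ((k-1)/2) hpar2 hpar1, wo k hki hkp]
            exact h1 k hk0 hkl hki
    · -- h2'
      intro k hk0 hkl hpar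
      rw [wlen] at hkl
      have hkp : k ≠ i'/2 := by omega
      by_cases hp0 : i'/2 = 0
      · -- grandparent equals i'/2 itself
        have hg : (i'/2-1)/2 = i'/2 := by omega
        rw [hg, wsnd]
        by_cases hki : k = i'+1
        · subst hki; rw [wfst]; exact le_of_lt hlt
        · rw [wo k hki hkp]
          have := h1 k hk0 hkl hki
          rw [hpar] at this
          omega
      · have hglt : (i'/2-1)/2 < i'/2 := by omega
        rw [wo ((i'/2-1)/2) (by omega) (by omega)]
        have hpp := h1 (i'/2) (by omega) hplen (by omega)
        by_cases hki : k = i'+1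
        · subst hki; rw [wfst]; exact hpp
        · rw [wo k hki hkp]
          have := h1 k hk0 hkl hki
          rw [hpar] at this
          omega

theorem siftUp_heap (l : List Int) (i : Nat) : i < l.length →
    (∀ k, 0 < k → k < l.length → k ≠ i → hGet l ((k-1)/2) ≤ hGet l k) →
    (∀ k, 0 < k → k < l.length → (k-1)/2 = i → hGet l ((i-1)/2) ≤ hGet l k) →
    HeapD (siftUp l i) 0 :=
  fun hi h1 h2 => siftUpAux_heap i l i (le_refl i) hi h1 h2

theorem hGet_append_left (l : List Int) (x : Int) (j : Nat) (h : j < l.length) :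
    hGet (l ++ [x]) j = hGet l j := by
  simp [hGet, List.getD, List.getElem?_append_left h]

theorem heappush_spec (l : List Int) (x : Int) (h : HeapD l 0) :
    HeapD (heappush l x) 0 ∧ (heappush l x).Perm (x :: l) := by
  unfold heappush
  constructor
  · apply siftUp_heap (l ++ [x]) l.length (by simp)
    · intro k hk0 hkl hki
      have hklen : k < l.length := by simp at hkl; omega
      rw [hGet_append_left l x k hklen, hGet_append_left l x ((k-1)/2) (by omega)]
      exact h k hk0 hklen (Nat.zero_le _)
    · intro k hk0 hkl hpar
      simp at hkl
      omega
  · exact (siftUp_perm (l ++ [x]) l.length (by simp)).trans (List.perm_append_singleton x l)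

-- heappop --------------------------------------------------------------------

theorem hGet_pop_rest (l : List Int) (v : Int) (j : Nat) (h0 : 0 < j) (hj : j < l.length - 1) :
    hGet ((l.dropLast).set 0 v) j = hGet l j := by
  rw [hGet_set_ne _ _ _ _ (by omega)]
  simp [hGet, List.getD, hj, List.getElem?_eq_getElem (show j < l.length by omega)]

theorem pop_perm (l : List Int) (hl : 2 ≤ l.length) :
    (hGet l 0 :: (l.dropLast).set 0 (hGet l (l.length - 1))).Perm l := by
  match l, hl with
  | a :: b :: t, _ =>
    have hne : (b :: t) ≠ [] := by simp
    have h0 : hGet (a :: b :: t) 0 = a := rfl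
    have hlast : hGet (a :: b :: t) ((a :: b :: t).length - 1) = (b :: t).getLast hne := by
      have hlen : (a :: b :: t).length - 1 = t.length + 1 := by simp
      rw [hlen]
      have hidx : t.length + 1 < (a :: b :: t).length := by simp
      rw [hGet_eq_getElem _ _ hidx, List.getLast_eq_getElem hne]
      simp
    have hdl : (a :: b :: t).dropLast = a :: (b :: t).dropLast := List.dropLast_cons₂
    rw [h0, hlast, hdl]
    simp only [List.set_cons_zero]
    refine List.Perm.cons a ?_
    have := List.perm_append_singleton ((b :: t).getLast hne) ((b :: t).dropLast)
    have heq : (b :: t).dropLast ++ [(b :: t).getLast hne] = b :: t :=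
      List.dropLast_append_getLast hne
    rw [heq] at this
    exact this.symm

theorem heappop_spec (l : List Int) (hl : 1 ≤ l.length) (h : HeapD l 0) :
    HeapD (heappop l).2 0 ∧ ((heappop l).1 :: (heappop l).2).Perm l ∧
      (heappop l).1 = hGet l 0 := by
  by_cases h1 : l.length ≤ 1
  · -- l is a singleton
    match l, hl, h1 with
    | [a], _, _ =>
      refine ⟨?_, ?_, rfl⟩
      · intro k hk0 hkl hkm
        exfalso
        simp [heappop] at hkl
      · simp [heappop, hGet]
  · have hl2 : 2 ≤ l.length := by omega
    have hpop : heappop l =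
        (hGet l 0, siftDown ((l.dropLast).set 0 (hGet l (l.length - 1))) 0) := by
      rw [heappop, if_neg h1]
    rw [hpop]
    refine ⟨?_, ?_, rfl⟩
    · apply siftDown_heapD _ 0 0 (le_refl 0)
      · intro k hk0 hkl hkm hne
        have hrl : ((l.dropLast).set 0 (hGet l (l.length - 1))).length = l.length - 1 := by
          simp
        rw [hrl] at hkl
        rw [hGet_pop_rest _ _ k hk0 hkl, hGet_pop_rest _ _ ((k-1)/2) (by omega) (by omega)]
        exact h k hk0 (by omega) (Nat.zero_le _)
      · intro k hk0 hkl hpar hi0 hmi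
        omega
    · exact ((siftDown_perm _ 0).cons _).trans (pop_perm l hl2)

-- the bridge -----------------------------------------------------------------

theorem heap_min_mem (l : List Int) (h : HeapD l 0) : ∀ y ∈ l, hGet l 0 ≤ y := by
  intro y hy
  obtain ⟨k, hk, rfl⟩ := List.mem_iff_getElem.1 hy
  rw [← hGet_eq_getElem l k hk]
  exact heap_min l h k hk

theorem hGet_mem (l : List Int) (k : Nat) (h : k < l.length) : hGet l k ∈ l := by
  rw [hGet_eq_getElem l k h]; exact List.getElem_mem h

/-- the heap root and `min(pool)` agree in VALUE whenever heap and pool hold the same multiset -/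
theorem root_eq_min (h p : List Int) (hh : HeapD h 0) (hp : h.Perm p) (hpos : 0 < h.length)
    (m : Int) (hm : PySem.List.min? p (fun x => x) = some m) : hGet h 0 = m := by
  apply le_antisymm
  · exact heap_min_mem h hh m (hp.mem_iff.2 (PySem.List.min?_mem hm))
  · exact PySem.List.min?_isMin hm _ (hp.mem_iff.1 (hGet_mem h 0 hpos))

theorem bridge (fuel : Nat) : ∀ (h p : List Int) (K cnt : Int), h ≠ [] → h.length ≤ fuel →
    HeapD h 0 → h.Perm p → solLoopAux fuel h K cnt = altLoopAux fuel p K cnt := by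
  induction fuel with
  | zero => intro h p K cnt hne hlen hh hp; rfl
  | succ fuel ih =>
    intro h p K cnt hne hlen hh hp
    have hlen_eq : h.length = p.length := hp.length_eq
    have hpos : 0 < h.length := List.length_pos_iff.mpr hne
    · have hp_pos : 0 < p.length := by omega
      have hpne : p ≠ [] := by
        intro hc; subst hc; simp at hp_pos
      obtain ⟨m, hm⟩ : ∃ m, PySem.List.min? p (fun x => x) = some m := by
        cases hmc : PySem.List.min? p (fun x => x) with
        | none => exact absurd ((PySem.List.min?_eq_none_iff _ _).mp hmc) hpne
        | some m => exact ⟨m, rfl⟩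
      have hroot : hGet h 0 = m := root_eq_min h p hh hp hpos m hm
      simp only [solLoopAux, altLoopAux, hm, hroot, hlen_eq]
      by_cases hK : m < K
      · rw [if_pos hK, if_pos hK]
        by_cases h2 : p.length < 2
        · rw [if_pos h2, if_pos h2]
        · rw [if_neg h2, if_neg h2]
          -- first pop / first remove
          obtain ⟨hh1, hperm1, hfst1⟩ := heappop_spec h (by omega) hh
          have hmem_p : m ∈ p := PySem.List.min?_mem hm
          have hrem1 : (PySem.List.remove? p m).getD p = p.erase m := by
            rw [PySem.List.remove?_eq_some_erase p m hmem_p]; rfl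
          have hperm1' : (heappop h).2.Perm (p.erase m) := by
            have : (m :: (heappop h).2).Perm p := by
              rw [← hroot, ← hfst1]; exact hperm1.trans hp
            exact (List.cons_perm_iff_perm_erase.mp this).2
          have hlen1 : (heappop h).2.length = p.length - 1 := by
            rw [heappop_length]; omega
          have h1pos : 0 < (heappop h).2.length := by omega
          have h1ne : p.erase m ≠ [] := by
            intro hc
            have hl := hperm1'.length_eq
            rw [hc] at hl
            simp only [List.length_nil] at hl
            omega
          -- second pop / second remove
          obtain ⟨hh2, hperm2, hfst2⟩ := heappop_spec (heappop h).2 (by omega) hh1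
          obtain ⟨b, hb⟩ : ∃ b, PySem.List.min? (p.erase m) (fun x => x) = some b := by
            cases hbc : PySem.List.min? (p.erase m) (fun x => x) with
            | none => exact absurd ((PySem.List.min?_eq_none_iff _ _).mp hbc) h1ne
            | some b => exact ⟨b, rfl⟩
          have hroot2 : (heappop (heappop h).2).1 = b := by
            rw [hfst2]
            exact root_eq_min (heappop h).2 (p.erase m) hh1 hperm1' h1pos b hb
          have hmem_b : b ∈ p.erase m := PySem.List.min?_mem hb
          have hrem2 : (PySem.List.remove? (p.erase m) b).getD (p.erase m) =
              (p.erase m).erase b := by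
            rw [PySem.List.remove?_eq_some_erase (p.erase m) b hmem_b]; rfl
          have hperm2' : (heappop (heappop h).2).2.Perm ((p.erase m).erase b) := by
            have : (b :: (heappop (heappop h).2).2).Perm (p.erase m) := by
              rw [← hroot2]; exact hperm2.trans hperm1'
            exact (List.cons_perm_iff_perm_erase.mp this).2
          -- push / append the mixed value
          have hv : (heappop h).1 + (heappop (heappop h).2).1 * 2 = m + 2 * b := by
            rw [hfst1, hroot, hroot2]; ring
          obtain ⟨hh3, hperm3⟩ :=
            heappush_spec (heappop (heappop h).2).2
              ((heappop h).1 + (heappop (heappop h).2).1 * 2) hh2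
          rw [hrem1]
          simp only [hb]
          rw [hrem2]
          apply ih
          · intro hc
            have hl3 := hperm3.length_eq
            rw [hc] at hl3
            simp at hl3
          · rw [heappush_length, heappop_length, heappop_length]; omega
          · exact hh3
          · refine hperm3.trans ?_
            rw [hv]
            exact ((hperm2'.cons _).trans (List.perm_append_singleton _ _).symm)
      · rw [if_neg hK, if_neg hK]

-- ===== VERDICT (by name: the statement is the Claim_ definition above) =====
theorem solution_spec : Claim_equal_solution := by
  intro scoville K _hdom _hpre
  unfold Spec_solution solution solution_alt
  obtain ⟨hh, hp⟩ := heapify_spec scoville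
  have hfuel : scoville.length = (heapify scoville).length := hp.length_eq.symm
  rw [hfuel]
  have hne : heapify scoville ≠ [] := by
    intro hc
    have := hp.length_eq
    rw [hc] at this
    simp at this
    exact _hpre (List.length_eq_zero_iff.mp this.symm)
  exact bridge (heapify scoville).length _ _ K 0 hne le_rfl hh hp
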